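-- pv_equiv track=rewrite | github.com/garimto81/virtual_table_db_gpt | projects/poker-gfx/docs/extract_detailed_sections.py | extract_graphics_customization
-- ===== SOURCE A (Python) =====
-- def extract_graphics_customization(text):
--     """그래픽 커스터마이징 옵션 추출"""
--     details = {
--         'skins': [],
--         'elements': [],
--         'animations': [],
--         'colors_fonts': [],
--         'logos_branding': []
--     }
--
--     lines = text.split('\n')
--
--     for line in lines:
--         line_lower = line.lower()
--
--         # 스킨 관련
--         if 'skin' in line_lower:
--             details['skins'].append(line.strip())
--
--         # 그래픽 요소
--         if any(word in line_lower for word in ['player box', 'leaderboard', 'ticker', 'overlay']):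
--             details['elements'].append(line.strip())
--
--         # 애니메이션
--         if any(word in line_lower for word in ['animation', 'transition', 'effect', 'fade']):
--             details['animations'].append(line.strip())
--
--         # 색상 및 폰트
--         if any(word in line_lower for word in ['color', 'colour', 'font', 'text']):
--             details['colors_fonts'].append(line.strip())
--
--         # 로고 및 브랜딩
--         if any(word in line_lower for word in ['logo', 'sponsor', 'brand', 'custom']):
--             details['logos_branding'].append(line.strip())
--
--     return details
-- ===== SOURCE B (Python) =====
-- def extract_graphics_customization(text):
--     """그래픽 커스터마이징 옵션 추출 (per-category comprehensions)"""
--     lines = text.split('\n')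
--
--     def category(words):
--         return [line.strip() for line in lines
--                 if any(w in line.lower() for w in words)]
--
--     return {
--         'skins': category(['skin']),
--         'elements': category(['player box', 'leaderboard', 'ticker', 'overlay']),
--         'animations': category(['animation', 'transition', 'effect', 'fade']),
--         'colors_fonts': category(['color', 'colour', 'font', 'text']),
--         'logos_branding': category(['logo', 'sponsor', 'brand', 'custom']),
--     }
-- ===== Notes on version B (the rewrite author's own statement) =====
-- stated objective: idiomatic
-- what changed: Replaces the single accumulating pass that appends into a pre-built dict with five independent per-category list comprehensions (one filtered scan per keyword set), building the dict directly from them.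
import Mathlib
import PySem

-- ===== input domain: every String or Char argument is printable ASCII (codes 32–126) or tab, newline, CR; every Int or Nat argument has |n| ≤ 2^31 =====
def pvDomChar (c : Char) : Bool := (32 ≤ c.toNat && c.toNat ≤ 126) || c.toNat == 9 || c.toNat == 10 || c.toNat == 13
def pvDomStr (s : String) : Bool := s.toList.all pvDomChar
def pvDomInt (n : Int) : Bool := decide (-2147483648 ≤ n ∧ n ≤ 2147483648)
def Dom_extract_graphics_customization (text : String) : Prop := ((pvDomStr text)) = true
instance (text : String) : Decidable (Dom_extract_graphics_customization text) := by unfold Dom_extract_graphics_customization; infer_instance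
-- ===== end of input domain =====

-- B builds the result from five independent per-category filtered scans instead of A's
-- single accumulating pass into a pre-built dict (idiomatic decomposition; same cost).


-- ===== PORT A =====
-- One pass over the lines, appending each matching line's strip to the corresponding
-- list of the dict; the dict has five fixed keys, modelled as a 5-tuple of lists that
-- is rendered in insertion order at the end.
def pvStepA (acc : List String × List String × List String × List String × List String)
    (line : String) : List String × List String × List String × List String × List String :=
  let ll := PySem.Str.lower line
  let (s, e, a, c, l) := acc
  let s := if PySem.Str.isIn "skin" ll then s ++ [PySem.Str.strip line] else s
  let e := if ["player box", "leaderboard", "ticker", "overlay"].any (fun w => PySem.Str.isIn w ll)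
           then e ++ [PySem.Str.strip line] else e
  let a := if ["animation", "transition", "effect", "fade"].any (fun w => PySem.Str.isIn w ll)
           then a ++ [PySem.Str.strip line] else a
  let c := if ["color", "colour", "font", "text"].any (fun w => PySem.Str.isIn w ll)
           then c ++ [PySem.Str.strip line] else c
  let l := if ["logo", "sponsor", "brand", "custom"].any (fun w => PySem.Str.isIn w ll)
           then l ++ [PySem.Str.strip line] else l
  (s, e, a, c, l)

def extract_graphics_customization (text : String) : List (String × List String) :=
  let lines := (PySem.Str.split? text "\n").getD []  -- text.split('\n'); sep ≠ "" so split? is some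
  let r := lines.foldl pvStepA ([], [], [], [], [])
  [("skins", r.1), ("elements", r.2.1), ("animations", r.2.2.1),
   ("colors_fonts", r.2.2.2.1), ("logos_branding", r.2.2.2.2)]

-- ===== PORT B =====
-- One filtered scan per category.
def pvCategory (lines : List String) (words : List String) : List String :=
  (lines.filter (fun line => words.any (fun w => PySem.Str.isIn w (PySem.Str.lower line)))).map
    PySem.Str.strip

def extract_graphics_customization_alt (text : String) : List (String × List String) :=
  let lines := (PySem.Str.split? text "\n").getD []  -- text.split('\n'); sep ≠ "" so split? is some
  [("skins", pvCategory lines ["skin"]),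
   ("elements", pvCategory lines ["player box", "leaderboard", "ticker", "overlay"]),
   ("animations", pvCategory lines ["animation", "transition", "effect", "fade"]),
   ("colors_fonts", pvCategory lines ["color", "colour", "font", "text"]),
   ("logos_branding", pvCategory lines ["logo", "sponsor", "brand", "custom"])]

-- ===== PRECONDITION & SPEC =====
def Spec_extract_graphics_customization (text : String) (out : List (String × List String)) : Prop := out = extract_graphics_customization_alt text
instance (text : String) (out : List (String × List String)) : Decidable (Spec_extract_graphics_customization text out) := by unfold Spec_extract_graphics_customization; infer_instance

-- ===== CLAIM (what is proved, stated in full; the proofs are below) =====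
def Claim_equal_extract_graphics_customization : Prop := ∀ (text : String), Dom_extract_graphics_customization text → Spec_extract_graphics_customization text (extract_graphics_customization text)

-- ===== LEMMAS AND PROOFS =====

-- The accumulating pass, projected, is the five filtered scans (induction on the lines,
-- generalizing all five accumulators).
theorem pvFoldA_eq (lines : List String)
    (s e a c l : List String) :
    lines.foldl pvStepA (s, e, a, c, l) =
      (s ++ pvCategory lines ["skin"],
       e ++ pvCategory lines ["player box", "leaderboard", "ticker", "overlay"],
       a ++ pvCategory lines ["animation", "transition", "effect", "fade"],
       c ++ pvCategory lines ["color", "colour", "font", "text"],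
       l ++ pvCategory lines ["logo", "sponsor", "brand", "custom"]) := by
  induction lines generalizing s e a c l with
  | nil => simp [pvCategory]
  | cons x xs ih =>
    simp only [List.foldl_cons, pvStepA, pvCategory, List.filter_cons, List.any_cons,
      List.any_nil, Bool.or_false]
    rw [ih]
    simp only [pvCategory]
    split_ifs <;> simp_all

-- ===== VERDICT (by name: the statement is the Claim_ definition above) =====
theorem extract_graphics_customization_spec : Claim_equal_extract_graphics_customization := by
  intro text _
  show _ = _
  simp only [extract_graphics_customization, extract_graphics_customization_alt, pvFoldA_eq, List.nil_append]
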